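-- pv_equiv track=rewrite | github.com/ellynhan/challenge100-codingtest-study | jokercsi/Programmers/n^2 배열 자르기.py | solution
-- ===== SOURCE A (Python) =====
-- def solution(n, left, right):
--     #모든 배열을 만드는게 시간이 걸린다...
--     #left 와 right의 제한이 있기때문에 그 부분만 알아내는 규칙 찾기
--
--     start = divmod(left, n)
--     end = divmod(right, n)
--
--     #1 2 3 4
--     #2 2 3 4
--     #3 3 3 4
--     #4 4 4 4
--
--     # 2차원 배열 선언하기
--     array1d = []
--     for i in range(start[0], end[0]+1):
--
--         # 시작과 마지막이 같은 층일 때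
--         if i == start[0] and i == end[0]:
--             for j in range(start[1], end[1]+1):
--                 if i > j:
--                     array1d.append(i + 1)
--                 else:
--                     array1d.append(j + 1)
--         # 시작 층 일 경우
--         elif i == start[0]:
--             for j in range(start[1], n):
--                 if i > j:
--                     array1d.append(i + 1)
--                 else:
--                     array1d.append(j + 1)
--
--         # 마지막 층 일 경우
--         elif i == end[0]:
--             for j in range(end[1]+1):
--                 if i > j:
--                     array1d.append(i + 1)
--                 else:
--                     array1d.append(j + 1)
--         # 시작과 마지막 층 사이 일 경우
--         else:
--             for j in range(n):
--                 if i > j: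
--                     array1d.append(i + 1)
--                 else:
--                     array1d.append(j + 1)
--
--     return array1d
-- ===== SOURCE B (Python) =====
-- def solution(n, left, right):
--     return [max(k // n, k % n) + 1 for k in range(left, right + 1)]
-- ===== Notes on version B (the rewrite author's own statement) =====
-- stated objective: simpler
-- what changed: Replaces A's four-branch row-by-row nested traversal (divmod bounds per layer) with a single flat comprehension over the linear index range, computing each cell as max(k//n, k%n)+1.
-- outside the precondition, e.g. on solution(0, 0, 3): A raises ZeroDivisionError, B raises ZeroDivisionError; on solution(-2, 0, 3): A returns [], B returns [1, 0, 1, 0]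
import Mathlib
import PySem

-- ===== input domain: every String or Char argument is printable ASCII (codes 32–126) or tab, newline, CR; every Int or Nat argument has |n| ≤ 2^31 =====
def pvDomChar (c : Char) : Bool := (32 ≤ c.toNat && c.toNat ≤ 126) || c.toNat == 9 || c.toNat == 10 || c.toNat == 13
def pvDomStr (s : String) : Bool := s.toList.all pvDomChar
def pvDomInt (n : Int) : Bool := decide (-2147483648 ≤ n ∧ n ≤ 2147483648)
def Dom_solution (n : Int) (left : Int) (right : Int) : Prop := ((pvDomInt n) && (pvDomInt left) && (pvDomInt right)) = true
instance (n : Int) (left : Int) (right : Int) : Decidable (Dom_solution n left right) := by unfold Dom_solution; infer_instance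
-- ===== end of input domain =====

-- One honest line: B replaces A's four-branch row-by-row traversal with a flat map
-- max(k//n, k%n)+1 over the linear index range; simpler, same cost.

-- ===== PORT A =====
def solution (n : Int) (left : Int) (right : Int) : List Int :=
  match PySem.Int.divmod? left n, PySem.Int.divmod? right n with
  | some start, some «end» =>
    (PySem.List.pyRange start.1 («end».1 + 1) 1).foldl (fun array1d i =>
      if i = start.1 ∧ i = «end».1 then
        (PySem.List.pyRange start.2 («end».2 + 1) 1).foldl
          (fun acc j => acc ++ [if i > j then i + 1 else j + 1]) array1d
      else if i = start.1 then
        (PySem.List.pyRange start.2 n 1).foldl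
          (fun acc j => acc ++ [if i > j then i + 1 else j + 1]) array1d
      else if i = «end».1 then
        (PySem.List.pyRange 0 («end».2 + 1) 1).foldl
          (fun acc j => acc ++ [if i > j then i + 1 else j + 1]) array1d
      else
        (PySem.List.pyRange 0 n 1).foldl
          (fun acc j => acc ++ [if i > j then i + 1 else j + 1]) array1d) []
  | _, _ => []   -- Python raises ZeroDivisionError here (n = 0); excluded by Pre_

-- ===== PORT B =====
def solution_alt (n : Int) (left : Int) (right : Int) : List Int :=
  (PySem.List.pyRange left (right + 1) 1).map
    (fun k => max (PySem.Int.floordiv k n) (PySem.Int.mod k n) + 1)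

-- ===== PRECONDITION & SPEC =====
-- Pre_ excludes n = 0, on which A raises ZeroDivisionError, and n < 0 (no n×n array
-- exists), where A's row decomposition with a negative modulus returns an accidental
-- value (e.g. [] for (-2,0,3)).
def Pre_solution (n : Int) (left : Int) (right : Int) : Prop := 1 ≤ n
instance (n : Int) (left : Int) (right : Int) : Decidable (Pre_solution n left right) := by
  unfold Pre_solution; infer_instance

def pvWitness_solution : Int × Int × Int := (3, 2, 5)

def Spec_solution (n : Int) (left : Int) (right : Int) (out : List Int) : Prop := out = solution_alt n left right
instance (n : Int) (left : Int) (right : Int) (out : List Int) : Decidable (Spec_solution n left right out) := by unfold Spec_solution; infer_instance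

-- ===== CLAIM (what is proved, stated in full; the proofs are below) =====
def Claim_equal_solution : Prop := ∀ (n : Int) (left : Int) (right : Int), Dom_solution n left right → Pre_solution n left right → Spec_solution n left right (solution n left right)

-- ===== LEMMAS AND PROOFS =====

-- B's per-cell value
def pvG (n k : Int) : Int := max (PySem.Int.floordiv k n) (PySem.Int.mod k n) + 1

-- A's per-cell body
def pvBody (i j : Int) : Int := if i > j then i + 1 else j + 1

-- one row: indices i*n+a … i*n+b-1 all have floordiv = i, mod = j
theorem pvRow (n i a b l u : Int) (hn : 1 ≤ n) (ha : 0 ≤ a) (hb : b ≤ n)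
    (hl : l = i * n + a) (hu : u = i * n + b) :
    (PySem.List.pyRange l u 1).map (pvG n) = (PySem.List.pyRange a b 1).map (pvBody i) := by
  subst hl hu
  rw [PySem.List.pyRange_one, PySem.List.pyRange_one]
  have hlen : (i * n + b - (i * n + a)).toNat = (b - a).toNat := by omega
  rw [hlen, List.map_map, List.map_map]
  apply List.map_congr_left
  intro k hk
  simp only [List.mem_range] at hk
  have hk' : (k : Int) < b - a := by omega
  simp only [Function.comp]
  have hj0 : 0 ≤ a + (k : Int) := by omega
  have hjn : a + (k : Int) < n := by omega
  have hfd : PySem.Int.floordiv (i * n + a + (k : Int)) n = i := by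
    rw [PySem.Int.floordiv_eq_iff_of_pos (by omega)]
    constructor <;> nlinarith
  have hmod : PySem.Int.mod (i * n + a + (k : Int)) n = a + (k : Int) := by
    have h := PySem.Int.floordiv_mul_add_mod (i * n + a + (k : Int)) n
    rw [hfd] at h; omega
  simp only [pvG, pvBody, hfd, hmod]
  omega

theorem pvFlatMapCongr {α β : Type} (l : List α) (f g : α → List β)
    (h : ∀ x ∈ l, f x = g x) : l.flatMap f = l.flatMap g := by
  induction l with
  | nil => rfl
  | cons x t ih =>
    simp only [List.flatMap_cons, h x (List.mem_cons_self),
      ih (fun y hy => h y (List.mem_cons_of_mem x hy))]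

-- A's branch structure, after folds are rewritten to flatMap/map
def pvRows (n l r : Int) (i : Int) : List Int :=
  if i = PySem.Int.floordiv l n ∧ i = PySem.Int.floordiv r n then
    (PySem.List.pyRange (PySem.Int.mod l n) (PySem.Int.mod r n + 1) 1).map (pvBody i)
  else if i = PySem.Int.floordiv l n then
    (PySem.List.pyRange (PySem.Int.mod l n) n 1).map (pvBody i)
  else if i = PySem.Int.floordiv r n then
    (PySem.List.pyRange 0 (PySem.Int.mod r n + 1) 1).map (pvBody i)
  else
    (PySem.List.pyRange 0 n 1).map (pvBody i)

-- the core induction: rows concatenated = flat map over the linear range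
theorem pvMain (n : Int) (hn : 1 ≤ n) :
    ∀ (d : Nat) (l r : Int),
      PySem.Int.floordiv r n = PySem.Int.floordiv l n + (d : Int) →
      (PySem.List.pyRange (PySem.Int.floordiv l n) (PySem.Int.floordiv r n + 1) 1).flatMap (pvRows n l r)
        = (PySem.List.pyRange l (r + 1) 1).map (pvG n) := by
  intro d
  induction d with
  | zero =>
    intro l r hd
    simp only [Nat.cast_zero, add_zero] at hd
    have hml : 0 ≤ PySem.Int.mod l n := PySem.Int.mod_nonneg (a := l) (b := n) (by omega)
    have hmr : 0 ≤ PySem.Int.mod r n := PySem.Int.mod_nonneg (a := r) (b := n) (by omega)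
    have hfl := PySem.Int.floordiv_mul_add_mod l n
    have hfr := PySem.Int.floordiv_mul_add_mod r n
    rw [hd, PySem.List.pyRange_one_singleton]
    simp only [List.flatMap_cons, List.flatMap_nil, List.append_nil]
    rw [pvRows, if_pos ⟨rfl, hd.symm⟩]
    rw [hd] at hfr
    exact (pvRow n (PySem.Int.floordiv l n) (PySem.Int.mod l n) (PySem.Int.mod r n + 1)
      l (r + 1) hn hml (by have := PySem.Int.mod_lt (a := r) (b := n) (by omega); omega)
      (by omega) (by omega)).symm
  | succ d ih =>
    intro l r hd
    have hml : 0 ≤ PySem.Int.mod l n := PySem.Int.mod_nonneg (a := l) (b := n) (by omega)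
    have hml' : PySem.Int.mod l n < n := PySem.Int.mod_lt (a := l) (b := n) (by omega)
    have hmr : 0 ≤ PySem.Int.mod r n := PySem.Int.mod_nonneg (a := r) (b := n) (by omega)
    have hfl := PySem.Int.floordiv_mul_add_mod l n
    have hfr := PySem.Int.floordiv_mul_add_mod r n
    set s0 := PySem.Int.floordiv l n with hs0
    set e0 := PySem.Int.floordiv r n with he0
    have hlt : s0 < e0 := by omega
    rw [PySem.List.pyRange_one_cons (by omega)]
    simp only [List.flatMap_cons]
    have hm1 : l ≤ (s0 + 1) * n := by nlinarith
    have hm2 : (s0 + 1) * n ≤ r + 1 := by nlinarith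
    rw [PySem.List.pyRange_one_append l ((s0 + 1) * n) (r + 1) hm1 hm2, List.map_append]
    have hfd_m : PySem.Int.floordiv ((s0 + 1) * n) n = s0 + 1 := by
      rw [PySem.Int.floordiv_eq_iff_of_pos (by omega)]
      constructor <;> nlinarith
    have hmod_m : PySem.Int.mod ((s0 + 1) * n) n = 0 := by
      have h := PySem.Int.floordiv_mul_add_mod ((s0 + 1) * n) n
      rw [hfd_m] at h; omega
    have hrow1 : pvRows n l r s0 = (PySem.List.pyRange l ((s0 + 1) * n) 1).map (pvG n) := by
      rw [pvRows, if_neg (by omega : ¬(s0 = s0 ∧ s0 = e0)), if_pos rfl]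
      exact (pvRow n s0 (PySem.Int.mod l n) n l ((s0 + 1) * n) hn hml le_rfl
        (by omega) (by ring)).symm
    have hrest : (PySem.List.pyRange (s0 + 1) (e0 + 1) 1).flatMap (pvRows n l r)
        = (PySem.List.pyRange (s0 + 1) (e0 + 1) 1).flatMap (pvRows n ((s0 + 1) * n) r) := by
      apply pvFlatMapCongr
      intro i hi
      rw [PySem.List.mem_pyRange_one] at hi
      simp only [pvRows, ← hs0, ← he0, hfd_m, hmod_m]
      by_cases h1 : i = e0
      · rw [if_neg (by omega : ¬(i = s0 ∧ i = e0)), if_neg (by omega : ¬ i = s0), if_pos h1]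
        by_cases h2 : i = s0 + 1
        · rw [if_pos ⟨h2, h1⟩]
        · rw [if_neg (by omega : ¬(i = s0 + 1 ∧ i = e0)), if_neg h2]
      · rw [if_neg (by omega : ¬(i = s0 ∧ i = e0)), if_neg (by omega : ¬ i = s0), if_neg h1]
        by_cases h2 : i = s0 + 1
        · rw [if_neg (by omega : ¬(i = s0 + 1 ∧ i = e0)), if_pos h2]
        · rw [if_neg (by omega : ¬(i = s0 + 1 ∧ i = e0)), if_neg h2]
    have hih := ih ((s0 + 1) * n) r (by rw [hfd_m, ← he0]; push_cast at hd ⊢; omega)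
    rw [hfd_m, ← he0] at hih
    rw [hrow1, hrest, hih]

-- rewrite A's nested folds into flatMap of pvRows
theorem pvSolutionEq (n l r : Int) (hn : 1 ≤ n) :
    solution n l r
      = (PySem.List.pyRange (PySem.Int.floordiv l n) (PySem.Int.floordiv r n + 1) 1).flatMap (pvRows n l r) := by
  have hdm : ∀ a : Int, PySem.Int.divmod? a n = some (PySem.Int.floordiv a n, PySem.Int.mod a n) := by
    intro a
    simp [PySem.Int.divmod?, PySem.Int.floordiv, PySem.Int.mod]
    omega
  rw [solution, hdm l, hdm r]
  show (PySem.List.pyRange (PySem.Int.floordiv l n) (PySem.Int.floordiv r n + 1) 1).foldl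
      (fun array1d i =>
        if i = PySem.Int.floordiv l n ∧ i = PySem.Int.floordiv r n then
          (PySem.List.pyRange (PySem.Int.mod l n) (PySem.Int.mod r n + 1) 1).foldl
            (fun acc j => acc ++ [if i > j then i + 1 else j + 1]) array1d
        else if i = PySem.Int.floordiv l n then
          (PySem.List.pyRange (PySem.Int.mod l n) n 1).foldl
            (fun acc j => acc ++ [if i > j then i + 1 else j + 1]) array1d
        else if i = PySem.Int.floordiv r n then
          (PySem.List.pyRange 0 (PySem.Int.mod r n + 1) 1).foldl
            (fun acc j => acc ++ [if i > j then i + 1 else j + 1]) array1d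
        else
          (PySem.List.pyRange 0 n 1).foldl
            (fun acc j => acc ++ [if i > j then i + 1 else j + 1]) array1d) []
    = _
  have hfun : (fun (array1d : List Int) (i : Int) =>
        if i = PySem.Int.floordiv l n ∧ i = PySem.Int.floordiv r n then
          (PySem.List.pyRange (PySem.Int.mod l n) (PySem.Int.mod r n + 1) 1).foldl
            (fun acc j => acc ++ [if i > j then i + 1 else j + 1]) array1d
        else if i = PySem.Int.floordiv l n then
          (PySem.List.pyRange (PySem.Int.mod l n) n 1).foldl
            (fun acc j => acc ++ [if i > j then i + 1 else j + 1]) array1d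
        else if i = PySem.Int.floordiv r n then
          (PySem.List.pyRange 0 (PySem.Int.mod r n + 1) 1).foldl
            (fun acc j => acc ++ [if i > j then i + 1 else j + 1]) array1d
        else
          (PySem.List.pyRange 0 n 1).foldl
            (fun acc j => acc ++ [if i > j then i + 1 else j + 1]) array1d)
      = (fun acc i => acc ++ pvRows n l r i) := by
    funext acc i
    simp only [PySem.List.foldl_append_singleton_eq_map, pvRows]
    split_ifs <;> rfl
  rw [hfun, PySem.List.foldl_append_eq_flatMap, List.nil_append]

-- ===== VERDICT (by name: the statement is the Claim_ definition above) =====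
theorem solution_spec : Claim_equal_solution := by
  intro n l r _ hpre
  unfold Spec_solution solution_alt
  have hn : 1 ≤ n := hpre
  rw [pvSolutionEq n l r hn]
  by_cases hlr : PySem.Int.floordiv l n ≤ PySem.Int.floordiv r n
  · obtain ⟨d, hd⟩ : ∃ d : Nat, PySem.Int.floordiv r n = PySem.Int.floordiv l n + (d : Int) :=
      ⟨(PySem.Int.floordiv r n - PySem.Int.floordiv l n).toNat, by omega⟩
    rw [pvMain n hn d l r hd]
    rfl
  · have hfl := PySem.Int.floordiv_mul_add_mod l n
    have hfr := PySem.Int.floordiv_mul_add_mod r n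
    have hml := PySem.Int.mod_nonneg (a:=l) (b:=n) (by omega)
    have hml' := PySem.Int.mod_lt (a:=l) (b:=n) (by omega)
    have hmr := PySem.Int.mod_nonneg (a:=r) (b:=n) (by omega)
    have hmr' := PySem.Int.mod_lt (a:=r) (b:=n) (by omega)
    have hrl : r < l := by nlinarith
    rw [PySem.List.pyRange_one_eq_nil (by omega),
        PySem.List.pyRange_one_eq_nil (by omega)]
    rfl
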